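-- pv_equiv track=rewrite | github.com/Shivkisku/Python_adv | sequence_reconstruction.py | reconstruct_sequence
-- ===== SOURCE A (Python) =====
-- def reconstruct_sequence(clues):
--     n = len(clues)
--     sequence = [0] * (n + 1)
--     current = 0
--
--     for i in range(n):
--         if clues[i] == '+':
--             current += 1
--         elif clues[i] == '-':
--             current -= 1
--         sequence[i + 1] = current
--
--     return sequence
-- ===== SOURCE B (Python) =====
-- def _delta(c):
--     if c == '+':
--         return 1
--     if c == '-':
--         return -1
--     return 0
--
-- def reconstruct_sequence(clues):
--     # Build the answer back-to-front: start from the grand total of all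
--     # deltas (the last prefix sum), walk the clues in reverse subtracting
--     # each delta to recover the earlier prefix sums, then reverse.
--     run = sum(map(_delta, clues))
--     out = []
--     for c in reversed(clues):
--         out.append(run)
--         run -= _delta(c)
--     out.append(run)
--     out.reverse()
--     return out
-- ===== Notes on version B (the rewrite author's own statement) =====
-- stated objective: alternative
-- what changed: Instead of A's forward pass writing running prefix sums into a preallocated array, B first sums all deltas to get the final value, then builds the output back-to-front by walking the clues in reverse and subtracting each delta (recovering each earlier prefix sum as a suffix difference from the total), reversing the list at the end.
import Mathlib
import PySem

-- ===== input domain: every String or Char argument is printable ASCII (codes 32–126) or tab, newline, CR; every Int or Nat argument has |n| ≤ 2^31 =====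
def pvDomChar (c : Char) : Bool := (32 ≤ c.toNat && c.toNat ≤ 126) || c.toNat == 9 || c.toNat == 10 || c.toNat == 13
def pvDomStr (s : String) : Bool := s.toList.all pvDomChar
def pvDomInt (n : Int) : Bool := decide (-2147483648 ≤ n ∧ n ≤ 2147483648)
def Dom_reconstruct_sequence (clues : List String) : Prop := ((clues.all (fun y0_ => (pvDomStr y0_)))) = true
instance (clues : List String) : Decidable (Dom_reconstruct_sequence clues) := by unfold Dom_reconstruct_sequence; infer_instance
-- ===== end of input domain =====

-- B replaces A's forward prefix-sum pass with indexed array writes by a total-first,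
-- back-to-front construction over the reversed clues (objective: alternative).

-- ===== PORT A =====
-- A's for-loop over i in range(n): structural recursion carrying the running
-- index i, the current value, and the sequence list updated in place by set.
def reconstruct_sequence.go : List String → Int → Nat → List Int → List Int
  | [], _, _, seq => seq
  | c :: rest, current, i, seq =>
      let current' := if c = "+" then current + 1 else if c = "-" then current - 1 else current
      reconstruct_sequence.go rest current' (i + 1) (seq.set (i + 1) current')

def reconstruct_sequence (clues : List String) : List Int :=
  let n := clues.length
  let sequence := List.replicate (n + 1) (0 : Int)
  reconstruct_sequence.go clues 0 0 sequence

-- ===== PORT B =====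
-- helper _delta(c)
def pvDelta (c : String) : Int :=
  if c = "+" then 1 else if c = "-" then -1 else 0

-- run = sum(map(_delta, clues)); for c in reversed(clues): out.append(run); run -= _delta(c);
-- out.append(run); out.reverse(); return out
def reconstruct_sequence_alt (clues : List String) : List Int :=
  let run := (clues.map pvDelta).sum
  let p := clues.reverse.foldl (fun (p : List Int × Int) c => (p.1 ++ [p.2], p.2 - pvDelta c)) ([], run)
  (p.1 ++ [p.2]).reverse

-- ===== PRECONDITION & SPEC =====
def Spec_reconstruct_sequence (clues : List String) (out : List Int) : Prop := out = reconstruct_sequence_alt clues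
instance (clues : List String) (out : List Int) : Decidable (Spec_reconstruct_sequence clues out) := by unfold Spec_reconstruct_sequence; infer_instance

-- ===== CLAIM (what is proved, stated in full; the proofs are below) =====
def Claim_equal_reconstruct_sequence : Prop := ∀ (clues : List String), Dom_reconstruct_sequence clues → Spec_reconstruct_sequence clues (reconstruct_sequence clues)

-- ===== LEMMAS AND PROOFS =====

-- the tail of the sequence A builds: successive running totals
def seqTail : Int → List String → List Int
  | _, [] => []
  | cur, c :: rest =>
      let cur' := if c = "+" then cur + 1 else if c = "-" then cur - 1 else cur
      cur' :: seqTail cur' rest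

theorem set_append_length (pre l : List Int) (v : Int) :
    (pre ++ l).set pre.length v = pre ++ l.set 0 v := by
  induction pre with
  | nil => simp
  | cons x xs ih => simp [ih]

theorem go_eq (clues : List String) : ∀ (cur : Int) (i : Nat) (pre : List Int),
    i + 1 = pre.length →
    reconstruct_sequence.go clues cur i (pre ++ List.replicate clues.length 0) =
      pre ++ seqTail cur clues := by
  induction clues with
  | nil => intro cur i pre _; simp [reconstruct_sequence.go, seqTail]
  | cons c rest ih =>
      intro cur i pre h
      simp only [reconstruct_sequence.go, seqTail, List.length_cons]
      rw [List.replicate_succ, h, set_append_length]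
      simp only [List.set]
      rw [show pre ++ (if c = "+" then cur + 1 else if c = "-" then cur - 1 else cur) ::
            List.replicate rest.length 0
          = (pre ++ [if c = "+" then cur + 1 else if c = "-" then cur - 1 else cur]) ++
            List.replicate rest.length 0 by simp]
      rw [ih _ pre.length _ (by simp)]
      simp

-- the descending run values B appends while scanning l
def revPrefix : Int → List String → List Int
  | _, [] => []
  | r, c :: cs => r :: revPrefix (r - pvDelta c) cs

theorem fold_char (l : List String) : ∀ (out : List Int) (run : Int),
    l.foldl (fun (p : List Int × Int) c => (p.1 ++ [p.2], p.2 - pvDelta c)) (out, run)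
      = (out ++ revPrefix run l, run - (l.map pvDelta).sum) := by
  induction l with
  | nil => intro out run; simp [revPrefix]
  | cons c cs ih =>
      intro out run
      simp only [List.foldl, revPrefix, List.map, List.sum_cons, ih]
      simp [sub_sub]

theorem revPrefix_reverse (clues : List String) : ∀ (base : Int),
    (revPrefix (base + (clues.map pvDelta).sum) clues.reverse).reverse = seqTail base clues := by
  induction clues with
  | nil => intro base; simp [revPrefix, seqTail]
  | cons c rest ih =>
      intro base
      have happ : ∀ (r : Int) (xs : List String),
          revPrefix r (xs ++ [c]) = revPrefix r xs ++ [r - (xs.map pvDelta).sum] := by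
        intro r xs
        induction xs generalizing r with
        | nil => simp [revPrefix]
        | cons x t iht =>
            simp only [List.cons_append, revPrefix, List.map, List.sum_cons, iht]
            simp [sub_sub]
      simp only [seqTail, List.reverse_cons, List.map, List.sum_cons, happ,
        List.reverse_append, List.reverse_singleton, List.singleton_append,
        List.map_reverse, List.sum_reverse]
      have e1 : base + (pvDelta c + (rest.map pvDelta).sum) - (rest.map pvDelta).sum
          = base + pvDelta c := by ring
      have e2 : base + (pvDelta c + (rest.map pvDelta).sum)
          = (base + pvDelta c) + (rest.map pvDelta).sum := by ring
      rw [e1, e2, ih (base + pvDelta c)]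
      have hcur : base + pvDelta c
          = (if c = "+" then base + 1 else if c = "-" then base - 1 else base) := by
        simp only [pvDelta]; split_ifs <;> ring
      rw [hcur]
      simp

-- ===== VERDICT (by name: the statement is the Claim_ definition above) =====
theorem reconstruct_sequence_spec : Claim_equal_reconstruct_sequence := by
  intro clues _
  show reconstruct_sequence.go clues 0 0 (List.replicate (clues.length + 1) 0)
      = reconstruct_sequence_alt clues
  have hA := go_eq clues 0 0 [0] (by simp)
  simp only [List.singleton_append] at hA
  rw [List.replicate_succ, hA]
  simp only [reconstruct_sequence_alt, fold_char, List.nil_append, List.map_reverse,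
    List.sum_reverse, sub_self, List.reverse_append, List.reverse_cons,
    List.reverse_nil, List.nil_append, List.singleton_append]
  have h := revPrefix_reverse clues 0
  rw [zero_add] at h
  rw [h]
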